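-- pv_equiv track=rewrite | github.com/power080900/coding_prac | LV0/Zoom_in_img.py | solution
-- ===== SOURCE A (Python) =====
-- def solution(picture, k):
--     answer = []
--     for i in range(len(picture)):
--         for _ in range(k):
--             temp = ''
--             for j in range(len(picture[i])):
--                 temp += picture[i][j] * k
--             answer.append(temp)
--
--     return answer
-- ===== SOURCE B (Python) =====
-- def solution(picture, k):
--     widened = [''.join(ch * k for ch in row) for row in picture]
--     answer = []
--     for w in widened:
--         answer.extend([w] * k)
--     return answer
-- ===== Notes on version B (the rewrite author's own statement) =====
-- stated objective: alternative
-- what changed: Splits A's single fused triple-nested loop into two separate passes: first materialize a list of horizontally-widened rows, then a second pass that vertically duplicates each widened row k times.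
import Mathlib
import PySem

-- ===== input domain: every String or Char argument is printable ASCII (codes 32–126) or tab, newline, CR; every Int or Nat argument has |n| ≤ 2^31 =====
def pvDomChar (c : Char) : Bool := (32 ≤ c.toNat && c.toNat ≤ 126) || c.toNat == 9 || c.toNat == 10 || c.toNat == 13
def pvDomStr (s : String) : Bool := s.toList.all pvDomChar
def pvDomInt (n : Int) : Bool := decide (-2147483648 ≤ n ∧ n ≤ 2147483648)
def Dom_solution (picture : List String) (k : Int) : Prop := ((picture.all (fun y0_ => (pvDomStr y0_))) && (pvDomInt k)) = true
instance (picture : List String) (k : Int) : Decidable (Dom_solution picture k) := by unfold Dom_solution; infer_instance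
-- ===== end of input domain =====

-- B splits A's fused triple loop into two passes (widen rows, then duplicate vertically); alternative decomposition, same results.

-- ===== PORT A =====
-- literal port of A: for i in range(len(picture)): for _ in range(k): temp built char by char, temp += picture[i][j]*k
-- 'picture[i][j] * k' (string repetition) is PySem.List.pyRepeat [c] k on the char list (exact, negative k gives '').
def solution (picture : List String) (k : Int) : List String :=
  (PySem.List.pyRange 0 (picture.length : Int) 1).foldl (fun answer i =>
    (PySem.List.pyRange 0 k 1).foldl (fun answer _ =>
      let row := (PySem.List.pyGetD picture i "").toList
      let temp := (PySem.List.pyRange 0 (row.length : Int) 1).foldl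
        (fun t j => t ++ PySem.List.pyRepeat [PySem.List.pyGetD row j ' '] k) ([] : List Char)
      answer ++ [String.mk temp]) answer) []

-- ===== PORT B =====
-- port of Source B: widened = [''.join(ch*k for ch in row) for row in picture]; then answer.extend([w]*k) per widened row.
def solution_alt (picture : List String) (k : Int) : List String :=
  let widened := picture.map (fun row =>
    String.mk (PySem.Chars.join [] (row.toList.map (fun c => PySem.List.pyRepeat [c] k))))
  widened.foldl (fun answer w => answer ++ PySem.List.pyRepeat [w] k) []

-- ===== PRECONDITION & SPEC =====
def Spec_solution (picture : List String) (k : Int) (out : List String) : Prop := out = solution_alt picture k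
instance (picture : List String) (k : Int) (out : List String) : Decidable (Spec_solution picture k out) := by unfold Spec_solution; infer_instance

-- ===== CLAIM (what is proved, stated in full; the proofs are below) =====
def Claim_equal_solution : Prop := ∀ (picture : List String) (k : Int), Dom_solution picture k → Spec_solution picture k (solution picture k)

-- ===== LEMMAS AND PROOFS =====

-- ''.join on separator '' is concatenation
theorem pv_join_nil_flatten (l : List (List Char)) : PySem.Chars.join [] l = l.flatten := by
  induction l with
  | nil => simp [PySem.Chars.join_nil]
  | cons p rest ih =>
    cases rest with
    | nil => simp [PySem.Chars.join, List.intercalate]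
    | cons q r => rw [PySem.Chars.join_cons_cons]; simp_all

-- a fold that appends g x per element is init ++ flatMap
theorem pv_foldl_append {α β : Type} (l : List α) (g : α → List β) (a : List β) :
    l.foldl (fun t x => t ++ g x) a = a ++ l.flatMap g := by
  induction l generalizing a with
  | nil => simp
  | cons x xs ih => simp [List.foldl, ih]

-- the inner temp-building loop of A equals B's widened row, as char lists
theorem pv_temp_eq (cs : List Char) (k : Int) :
    (PySem.List.pyRange 0 (cs.length : Int) 1).foldl
      (fun t j => t ++ PySem.List.pyRepeat [PySem.List.pyGetD cs j ' '] k) ([] : List Char)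
      = PySem.Chars.join [] (cs.map (fun c => PySem.List.pyRepeat [c] k)) := by
  rw [PySem.List.foldl_pyRange_zero_pyGetD' cs ' '
        (fun t c => t ++ PySem.List.pyRepeat [c] k) ([] : List Char),
      pv_foldl_append cs, pv_join_nil_flatten]
  simp [List.flatMap]

-- a loop that appends the same element once per iteration appends l.length copies
theorem pv_const_append (l : List Int) (t : String) (a : List String) :
    l.foldl (fun ans _ => ans ++ [t]) a = a ++ List.replicate l.length t := by
  induction l generalizing a with
  | nil => simp
  | cons x xs ih => simp [List.foldl, ih, List.replicate_succ]

theorem pv_main (picture : List String) (k : Int) :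
    solution picture k = solution_alt picture k := by
  unfold solution solution_alt
  rw [show ((picture.length : Int)) = PySem.List.len picture by simp [PySem.List.len]]
  rw [PySem.List.foldl_pyRange_zero_pyGetD picture ""
        (fun answer row =>
          (PySem.List.pyRange 0 k 1).foldl (fun answer _ =>
            answer ++ [String.mk ((PySem.List.pyRange 0 (row.toList.length : Int) 1).foldl
              (fun t j => t ++ PySem.List.pyRepeat [PySem.List.pyGetD row.toList j ' '] k) ([] : List Char))]) answer)
        ([] : List String)]
  rw [List.foldl_map]
  apply List.foldl_ext
  intro a row _
  rw [pv_temp_eq, pv_const_append, PySem.List.length_pyRange_one, PySem.List.pyRepeat_singleton]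
  simp

-- ===== VERDICT (by name: the statement is the Claim_ definition above) =====
theorem solution_spec : Claim_equal_solution := by
  intro picture k _
  exact pv_main picture k
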